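-- pv_equiv track=rewrite | github.com/Enedev/DataStructures-with-ene | recursividad/EjerciciosTaller/e3.py | sum_odd_numbers_matrix
-- ===== SOURCE A (Python) =====
-- def sum_odd_numbers_matrix(matrix, row=0, col=0, total=0):
--     if row == len(matrix):
--         return total
--     if col == len(matrix[0]):
--         return sum_odd_numbers_matrix(matrix, row + 1, 0, total)
--     if matrix[row][col] % 2 != 0:
--         total += matrix[row][col]
--     return sum_odd_numbers_matrix(matrix, row, col + 1, total)
-- ===== SOURCE B (Python) =====
-- def sum_odd_numbers_matrix(matrix, row=0, col=0, total=0):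
--     n = len(matrix)
--     if row == n:
--         return total
--     width = len(matrix[0])
--     for c in range(col, width):
--         v = matrix[row][c]
--         if v % 2 != 0:
--             total += v
--     for r in range(row + 1, n):
--         for c in range(width):
--             v = matrix[r][c]
--             if v % 2 != 0:
--                 total += v
--     return total
-- ===== Notes on version B (the rewrite author's own statement) =====
-- stated objective: idiomatic
-- what changed: Replaces A's per-cell tail recursion carrying (row, col, total) state by two explicit range-based loops: finish the current row from col, then sweep the remaining rows column by column with the width taken from matrix[0], exactly as A does.
-- outside the precondition, e.g. on sum_odd_numbers_matrix([[]], -3, 0, 0): A returns 0, B returns 0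
import Mathlib
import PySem

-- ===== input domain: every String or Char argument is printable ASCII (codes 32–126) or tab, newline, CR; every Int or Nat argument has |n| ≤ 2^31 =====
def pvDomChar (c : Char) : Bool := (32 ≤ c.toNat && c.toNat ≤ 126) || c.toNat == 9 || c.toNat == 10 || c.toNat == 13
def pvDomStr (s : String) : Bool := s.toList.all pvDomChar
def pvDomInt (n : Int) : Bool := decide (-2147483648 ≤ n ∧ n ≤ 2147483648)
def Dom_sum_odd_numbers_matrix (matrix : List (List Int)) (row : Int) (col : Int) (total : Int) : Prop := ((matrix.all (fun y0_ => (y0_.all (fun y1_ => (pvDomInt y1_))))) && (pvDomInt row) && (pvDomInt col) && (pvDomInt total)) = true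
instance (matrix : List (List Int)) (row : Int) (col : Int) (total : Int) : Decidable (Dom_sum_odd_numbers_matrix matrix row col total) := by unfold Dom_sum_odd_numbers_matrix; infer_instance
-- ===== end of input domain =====

-- B replaces A's per-cell recursion by two explicit loops (resume the current row, then sweep the remaining rows); equivalence is about the return value only (no mutation).

-- ===== PORT A =====
-- matrix[r][c] with Python negative-index semantics; the defaults are only reached outside Pre_.
def pvCell (matrix : List (List Int)) (r c : Int) : Int :=
  (PySem.List.pyGet? ((PySem.List.pyGet? matrix r).getD []) c).getD 0

-- A's recursion, made total with a fuel counter (A diverges/raises only outside Pre_).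
def sumOddAux (matrix : List (List Int)) : Nat → Int → Int → Int → Int
  | 0, _, _, total => total
  | fuel+1, row, col, total =>
    if row = (matrix.length : Int) then total
    else if col = (matrix.headI.length : Int) then
      sumOddAux matrix fuel (row + 1) 0 total
    else
      let total' := if PySem.Int.mod (pvCell matrix row col) 2 ≠ 0
                    then total + pvCell matrix row col else total
      sumOddAux matrix fuel row (col + 1) total'

def sum_odd_numbers_matrix (matrix : List (List Int)) (row : Int) (col : Int) (total : Int) : Int :=
  sumOddAux matrix
    ((2 * matrix.length + 2) * (matrix.headI.length + 2) + matrix.flatten.length)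
    row col total

-- ===== PORT B =====
-- one pass over the columns [a, b) of row r (B's inner 'for c in range(a, b)' loop)
def pvColFold (matrix : List (List Int)) (r a b t : Int) : Int :=
  (PySem.List.pyRange a b 1).foldl
    (fun t c =>
      let v := pvCell matrix r c
      if PySem.Int.mod v 2 ≠ 0 then t + v else t) t

def sum_odd_numbers_matrix_alt (matrix : List (List Int)) (row : Int) (col : Int) (total : Int) : Int :=
  if row = (matrix.length : Int) then total
  else
    (PySem.List.pyRange (row + 1) (matrix.length : Int) 1).foldl
      (fun t r => pvColFold matrix r 0 (matrix.headI.length : Int) t)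
      (pvColFold matrix row col (matrix.headI.length : Int) total)

-- ===== PRECONDITION & SPEC =====
-- length of matrix[r] under Python indexing (0 when the index is invalid)
def pvLrow (matrix : List (List Int)) (r : Int) : Nat :=
  ((PySem.List.pyGet? matrix r).getD []).length

-- Pre_ excludes exactly the inputs on which A raises (IndexError on an invalid row/column
-- access, or unbounded recursion when row > len(matrix)), plus the degenerate corner
-- row < -len(matrix): there A never reads the out-of-range rows and can still return in the
-- zero-width case (crashing with RecursionError for large offsets), an accident of blind
-- recursion outside Python's valid index range [-len, len]; B returns the same value there.
def Pre_sum_odd_numbers_matrix (matrix : List (List Int)) (row : Int) (col : Int) (total : Int) : Prop :=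
  row ≤ (matrix.length : Int) ∧
  (row < (matrix.length : Int) →
    matrix ≠ [] ∧
    -(matrix.length : Int) ≤ row ∧
    col ≤ (matrix.headI.length : Int) ∧
    (col < (matrix.headI.length : Int) →
      (col < 0 → -col ≤ (pvLrow matrix row : Int)) ∧
      (1 ≤ matrix.headI.length → matrix.headI.length ≤ pvLrow matrix row)) ∧
    (1 ≤ matrix.headI.length →
      ∀ r ∈ PySem.List.pyRange (row + 1) (matrix.length : Int) 1,
        matrix.headI.length ≤ pvLrow matrix r))

instance (matrix : List (List Int)) (row : Int) (col : Int) (total : Int) : Decidable (Pre_sum_odd_numbers_matrix matrix row col total) := by unfold Pre_sum_odd_numbers_matrix; infer_instance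

def pvWitness_sum_odd_numbers_matrix : List (List Int) × Int × Int × Int := ([[1, 2], [3, 4]], 0, 0, 0)

def Spec_sum_odd_numbers_matrix (matrix : List (List Int)) (row : Int) (col : Int) (total : Int) (out : Int) : Prop := out = sum_odd_numbers_matrix_alt matrix row col total
instance (matrix : List (List Int)) (row : Int) (col : Int) (total : Int) (out : Int) : Decidable (Spec_sum_odd_numbers_matrix matrix row col total out) := by unfold Spec_sum_odd_numbers_matrix; infer_instance

-- ===== CLAIM (what is proved, stated in full; the proofs are below) =====
def Claim_equal_sum_odd_numbers_matrix : Prop := ∀ (matrix : List (List Int)) (row : Int) (col : Int) (total : Int), Dom_sum_odd_numbers_matrix matrix row col total → Pre_sum_odd_numbers_matrix matrix row col total → Spec_sum_odd_numbers_matrix matrix row col total (sum_odd_numbers_matrix matrix row col total)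

-- ===== LEMMAS AND PROOFS =====

lemma pvLrow_le_flatten (matrix : List (List Int)) (r : Int) :
    pvLrow matrix r ≤ matrix.flatten.length := by
  unfold pvLrow
  cases h : PySem.List.pyGet? matrix r with
  | none => simp
  | some l =>
    have hmem : l ∈ matrix := PySem.List.mem_of_pyGet?_eq_some matrix h
    obtain ⟨s, t, rfl⟩ := List.append_of_mem hmem
    simp
    omega

-- alt at the end-of-matrix state
lemma pvAlt_end (matrix : List (List Int)) (row col total : Int)
    (h : row = (matrix.length : Int)) :
    sum_odd_numbers_matrix_alt matrix row col total = total := by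
  simp [sum_odd_numbers_matrix_alt, h]

-- alt at an end-of-row state equals alt at the start of the next row
lemma pvAlt_row_step (matrix : List (List Int)) (row total : Int)
    (hrow : row < (matrix.length : Int)) :
    sum_odd_numbers_matrix_alt matrix row (matrix.headI.length : Int) total
      = sum_odd_numbers_matrix_alt matrix (row + 1) 0 total := by
  have hne : row ≠ (matrix.length : Int) := by omega
  have hnil : pvColFold matrix row (matrix.headI.length : Int) (matrix.headI.length : Int) total = total := by
    simp [pvColFold, PySem.List.pyRange_one_eq_nil le_rfl]
  by_cases hlast : row + 1 = (matrix.length : Int)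
  · simp [sum_odd_numbers_matrix_alt, hne, hlast, hnil]
  · have hcons := PySem.List.pyRange_one_cons (a := row + 1) (b := (matrix.length : Int)) (by omega)
    simp [sum_odd_numbers_matrix_alt, hne, hlast, hnil, hcons]

-- alt absorbs one cell step of the current row
lemma pvAlt_col_step (matrix : List (List Int)) (row col total : Int)
    (hrow : row < (matrix.length : Int)) (hcol : col < (matrix.headI.length : Int)) :
    sum_odd_numbers_matrix_alt matrix row col total
      = sum_odd_numbers_matrix_alt matrix row (col + 1)
          (if PySem.Int.mod (pvCell matrix row col) 2 ≠ 0
           then total + pvCell matrix row col else total) := by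
  have hne : row ≠ (matrix.length : Int) := by omega
  have hcons := PySem.List.pyRange_one_cons (a := col) (b := (matrix.headI.length : Int)) hcol
  simp only [sum_odd_numbers_matrix_alt, hne, if_false, pvColFold, hcons, List.foldl_cons]

lemma pvSumOddAux_end (matrix : List (List Int)) (f : Nat) (row col total : Int)
    (h : row = (matrix.length : Int)) : sumOddAux matrix f row col total = total := by
  cases f <;> simp [sumOddAux, h]

lemma pvA_eq (matrix : List (List Int)) :
    ∀ (fuel : Nat) (row col total : Int),
      row ≤ (matrix.length : Int) →
      (row < (matrix.length : Int) → col ≤ (matrix.headI.length : Int)) →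
      ((matrix.length : Int) - row).toNat * (matrix.headI.length + 1)
        + ((matrix.headI.length : Int) - col).toNat + 1 ≤ fuel →
      sumOddAux matrix fuel row col total = sum_odd_numbers_matrix_alt matrix row col total := by
  intro fuel
  induction fuel with
  | zero => intro row col total _ _ hf; omega
  | succ fuel ih =>
    intro row col total h1 h2 hf
    by_cases hr : row = (matrix.length : Int)
    · simp [sumOddAux, hr, pvAlt_end]
    · have hrow : row < (matrix.length : Int) := lt_of_le_of_ne h1 hr
      have hcw : col ≤ (matrix.headI.length : Int) := h2 hrow
      by_cases hc : col = (matrix.headI.length : Int)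
      · have step : sumOddAux matrix (fuel + 1) row col total
            = sumOddAux matrix fuel (row + 1) 0 total := by
          simp [sumOddAux, hr, hc]
        rw [step, ih (row + 1) 0 total (by omega) (by intro _; omega) (by
          have e1 : ((matrix.length : Int) - row).toNat * (matrix.headI.length + 1)
              = ((matrix.length : Int) - (row + 1)).toNat * (matrix.headI.length + 1)
                + (matrix.headI.length + 1) := by
            have e0 : ((matrix.length : Int) - row).toNat
                = ((matrix.length : Int) - (row + 1)).toNat + 1 := by omega
            rw [e0]; ring
          rw [e1] at hf
          omega)]
        rw [← pvAlt_row_step matrix row total hrow, ← hc]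
      · have hcol : col < (matrix.headI.length : Int) := lt_of_le_of_ne hcw hc
        have step : sumOddAux matrix (fuel + 1) row col total
            = sumOddAux matrix fuel row (col + 1)
                (if PySem.Int.mod (pvCell matrix row col) 2 ≠ 0
                 then total + pvCell matrix row col else total) := by
          simp [sumOddAux, hr, hc]
        rw [step, ih row (col + 1) _ h1 (by intro _; omega) (by omega)]
        rw [← pvAlt_col_step matrix row col total hrow hcol]

-- ===== VERDICT (by name: the statement is the Claim_ definition above) =====
theorem sum_odd_numbers_matrix_spec : Claim_equal_sum_odd_numbers_matrix := by
  unfold Claim_equal_sum_odd_numbers_matrix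
  intro matrix row col total _ hpre
  unfold Spec_sum_odd_numbers_matrix sum_odd_numbers_matrix
  obtain ⟨h1, h2⟩ := hpre
  by_cases hr : row = (matrix.length : Int)
  · rw [pvSumOddAux_end matrix _ row col total hr, pvAlt_end matrix row col total hr]
  · have hrow : row < (matrix.length : Int) := lt_of_le_of_ne h1 hr
    obtain ⟨-, hlo, hcw, hcneg, -⟩ := h2 hrow
    apply pvA_eq matrix _ row col total h1 (fun _ => hcw)
    -- fuel bound
    have hN : ((matrix.length : Int) - row).toNat ≤ 2 * matrix.length := by omega
    have hW : ((matrix.headI.length : Int) - col).toNat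
        ≤ matrix.headI.length + matrix.flatten.length := by
      by_cases hcz : 0 ≤ col
      · omega
      · have hclt : col < (matrix.headI.length : Int) := by omega
        have := (hcneg hclt).1 (by omega)
        have := pvLrow_le_flatten matrix row
        omega
    have hmul := Nat.mul_le_mul_right (matrix.headI.length + 1) hN
    have hring : (2 * matrix.length + 2) * (matrix.headI.length + 2)
        = 2 * matrix.length * (matrix.headI.length + 1) + 2 * matrix.length
          + 2 * matrix.headI.length + 4 := by ring
    omega
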